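-- pv_equiv track=rewrite | github.com/guilhermegouw/Dojo | secret_sentence/challenge.py | decode_luka
-- ===== SOURCE A (Python) =====
-- def decode_luka(sentence):
--     vowels = "aeiou"
--     decode = ""
--     i = 0
--     while i < len(sentence):
--         decode += sentence[i]
--         if sentence[i] in vowels:
--             i += 2
--         i += 1
--     return decode
-- ===== SOURCE B (Python) =====
-- import re
--
-- def decode_luka(sentence):
--     return re.sub(r'([aeiou]).{0,2}', r'\1', sentence, flags=re.S)
-- ===== Notes on version B (the rewrite author's own statement) =====
-- stated objective: faster
-- what changed: Replaces the manual index-jumping while loop with a single declarative regex substitution that matches each lowercase vowel plus up to two following characters (re.S so newlines count) and keeps only the vowel.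
import Mathlib
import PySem

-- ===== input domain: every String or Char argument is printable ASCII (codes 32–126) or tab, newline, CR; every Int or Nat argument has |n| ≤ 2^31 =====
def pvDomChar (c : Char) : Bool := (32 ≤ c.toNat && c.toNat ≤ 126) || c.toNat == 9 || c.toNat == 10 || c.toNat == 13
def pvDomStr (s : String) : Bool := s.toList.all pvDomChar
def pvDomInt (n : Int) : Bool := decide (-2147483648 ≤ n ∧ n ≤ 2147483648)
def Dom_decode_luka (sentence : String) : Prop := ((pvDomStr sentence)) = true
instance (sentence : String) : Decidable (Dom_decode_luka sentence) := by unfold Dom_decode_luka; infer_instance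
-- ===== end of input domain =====

-- B replaces A's index-jumping while loop by one regex substitution (re.sub(r'([aeiou]).{0,2}', r'\1', sentence, flags=re.S)); idiomatic, same results.

-- ===== PORT A =====
-- A's while loop: index i, append sentence[i], jump i by 3 after a vowel else by 1.
def decodeLukaLoop (cs : List Char) (i : Nat) (acc : List Char) : List Char :=
  if h : i < cs.length then
    let c := cs[i]
    decodeLukaLoop cs (if ("aeiou".toList).contains c then i + 3 else i + 1) (acc ++ [c])
  else acc
termination_by cs.length - i
decreasing_by all_goals (split <;> omega)

def decode_luka (sentence : String) : String :=
  String.mk (decodeLukaLoop sentence.toList 0 [])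

-- ===== PORT B =====
-- Hand port of Source B's re.sub(r'([aeiou]).{0,2}', r'\1', s, flags=re.S): exact for this
-- pattern — at each position a lowercase vowel greedily consumes up to two following
-- characters (re.S: any characters, newlines included) and only the vowel is emitted;
-- any other character is left untouched and scanning moves one character right.
def decodeLukaSub (cs : List Char) : List Char :=
  match cs with
  | [] => []
  | c :: rest =>
    if ("aeiou".toList).contains c then c :: decodeLukaSub (rest.drop 2)
    else c :: decodeLukaSub rest
termination_by cs.length
decreasing_by all_goals simp [List.length_drop] <;> omega

def decode_luka_alt (sentence : String) : String :=
  String.mk (decodeLukaSub sentence.toList)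

-- ===== PRECONDITION & SPEC =====
def Spec_decode_luka (sentence : String) (out : String) : Prop := out = decode_luka_alt sentence
instance (sentence : String) (out : String) : Decidable (Spec_decode_luka sentence out) := by unfold Spec_decode_luka; infer_instance

-- ===== CLAIM (what is proved, stated in full; the proofs are below) =====
def Claim_equal_decode_luka : Prop := ∀ (sentence : String), Dom_decode_luka sentence → Spec_decode_luka sentence (decode_luka sentence)

-- ===== LEMMAS AND PROOFS =====
theorem decodeLukaLoop_eq (n : Nat) : ∀ (cs : List Char) (i : Nat) (acc : List Char),
    cs.length - i ≤ n → decodeLukaLoop cs i acc = acc ++ decodeLukaSub (cs.drop i) := by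
  induction n with
  | zero =>
    intro cs i acc h
    have hge : cs.length ≤ i := by omega
    rw [decodeLukaLoop, dif_neg (by omega), List.drop_eq_nil_of_le hge, decodeLukaSub]
    simp
  | succ n ih =>
    intro cs i acc h
    by_cases hi : i < cs.length
    case neg =>
      rw [decodeLukaLoop, dif_neg hi, List.drop_eq_nil_of_le (by omega), decodeLukaSub]
      simp
    have hdrop : cs.drop i = cs[i] :: cs.drop (i + 1) := List.drop_eq_getElem_cons hi
    rw [decodeLukaLoop, dif_pos hi, hdrop, decodeLukaSub]
    by_cases hv : ("aeiou".toList).contains cs[i] = true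
    · simp only [hv, if_true]
      rw [ih cs (i + 3) (acc ++ [cs[i]]) (by omega)]
      simp [List.drop_drop]
    · simp only [hv, if_false, Bool.false_eq_true]
      rw [ih cs (i + 1) (acc ++ [cs[i]]) (by omega)]
      simp

-- ===== VERDICT (by name: the statement is the Claim_ definition above) =====
theorem decode_luka_spec : Claim_equal_decode_luka := by
  intro sentence _
  unfold Spec_decode_luka decode_luka decode_luka_alt
  rw [decodeLukaLoop_eq (sentence.toList.length) sentence.toList 0 [] (by omega)]
  simp
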